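-- pv_equiv track=rewrite | github.com/zhenfelix/OnlineJudgeCodings | LeetCode/2591. Distribute Money to Maximum Children/solution.py | distMoney
-- ===== SOURCE A (Python) =====
-- def distMoney(money: int, children: int) -> int:
--     if money == children*8:
--         return children
--     if money-(children-1)*8 > 0 and money-(children-1)*8 != 4:
--         return children-1
--     for i in range(children-1)[::-1]:
--         if money-i*8 >= children-i:
--             return i
--     return -1
-- ===== SOURCE B (Python) =====
-- def distMoney(money: int, children: int) -> int:
--     if money == children * 8:
--         return children
--     r = money - (children - 1) * 8
--     if r > 0 and r != 4:
--         return children - 1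
--     k = (money - children) // 7
--     if children >= 2 and k >= 0:
--         return min(children - 2, k)
--     return -1
-- ===== Notes on version B (the rewrite author's own statement) =====
-- stated objective: faster
-- what changed: Replaces A's downward linear scan over range(children-1) with the closed form min(children-2, (money-children)//7), keeping the two guard branches.
import Mathlib
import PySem

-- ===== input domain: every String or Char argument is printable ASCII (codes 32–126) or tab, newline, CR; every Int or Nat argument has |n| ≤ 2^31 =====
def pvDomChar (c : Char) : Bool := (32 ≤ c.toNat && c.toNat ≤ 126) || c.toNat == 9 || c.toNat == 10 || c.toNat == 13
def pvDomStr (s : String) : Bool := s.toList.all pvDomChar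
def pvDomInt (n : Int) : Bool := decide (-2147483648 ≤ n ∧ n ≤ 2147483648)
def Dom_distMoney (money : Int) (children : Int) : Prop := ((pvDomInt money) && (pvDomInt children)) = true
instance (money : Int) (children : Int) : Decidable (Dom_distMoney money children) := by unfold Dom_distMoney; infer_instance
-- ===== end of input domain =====

-- B replaces A's linear downward scan by an O(1) closed form min(children-2, (money-children)//7).

-- ===== PORT A =====
-- the for-loop with early return over range(children-1)[::-1] is ported as find? on
-- the reversed range list ([::-1] is reversal, exact: PySem.List.slice?_none_none_neg_one),
-- defaulting to -1 when no i matches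
def distMoney (money : Int) (children : Int) : Int :=
  if money = children * 8 then children
  else if money - (children - 1) * 8 > 0 ∧ money - (children - 1) * 8 ≠ 4 then children - 1
  else
    match ((PySem.List.pyRange 0 (children - 1) 1).reverse).find?
        (fun i => decide (money - i * 8 ≥ children - i)) with
    | some i => i
    | none => -1

-- ===== PORT B =====
def distMoney_alt (money : Int) (children : Int) : Int :=
  if money = children * 8 then children
  else
    let r := money - (children - 1) * 8
    if r > 0 ∧ r ≠ 4 then children - 1
    else
      let k := PySem.Int.floordiv (money - children) 7
      if children ≥ 2 ∧ k ≥ 0 then min (children - 2) k else -1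

-- ===== PRECONDITION & SPEC =====
def Spec_distMoney (money : Int) (children : Int) (out : Int) : Prop := out = distMoney_alt money children
instance (money : Int) (children : Int) (out : Int) : Decidable (Spec_distMoney money children out) := by unfold Spec_distMoney; infer_instance

-- ===== CLAIM (what is proved, stated in full; the proofs are below) =====
def Claim_equal_distMoney : Prop := ∀ (money : Int) (children : Int), Dom_distMoney money children → Spec_distMoney money children (distMoney money children)

-- ===== LEMMAS AND PROOFS =====

-- the first element of the countdown list [m, m-1, …, 0] satisfying
-- money - 8i ≥ children - i (⇔ 7i ≤ money - children) is min m ((money-children)/7)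
lemma find_countdown (money children : Int) : ∀ (n : Nat), ∀ (m : Int), m < (n : Int) →
    (PySem.List.pyRange m (-1) (-1)).find? (fun i => decide (money - i * 8 ≥ children - i)) =
      if 0 ≤ m ∧ 0 ≤ money - children then some (min m ((money - children) / 7)) else none := by
  intro n
  induction n with
  | zero =>
    intro m hm
    rw [PySem.List.pyRange_neg_one_eq_nil (by omega)]
    simp only [List.find?_nil]
    rw [if_neg (by omega)]
  | succ n ih =>
    intro m hm
    by_cases h0 : m ≤ -1
    · rw [PySem.List.pyRange_neg_one_eq_nil (by omega)]
      simp only [List.find?_nil]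
      rw [if_neg (by omega)]
    · rw [PySem.List.pyRange_neg_one_cons (by omega), List.find?_cons]
      by_cases hp : money - m * 8 ≥ children - m
      · simp only [decide_eq_true hp]
        rw [if_pos (show 0 ≤ m ∧ 0 ≤ money - children from ⟨by omega, by omega⟩)]
        congr 1
        omega
      · simp only [decide_eq_false hp]
        rw [ih (m - 1) (by omega)]
        by_cases h1 : 0 ≤ m - 1 ∧ 0 ≤ money - children
        · rw [if_pos h1, if_pos (show 0 ≤ m ∧ 0 ≤ money - children from ⟨by omega, h1.2⟩)]
          congr 1
          omega
        · rw [if_neg h1, if_neg (by omega)]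

-- the reversed range(children-1) is the countdown range from children-2 to 0
lemma reversed_range (children : Int) :
    (PySem.List.pyRange 0 (children - 1) 1).reverse = PySem.List.pyRange (children - 2) (-1) (-1) := by
  have h := PySem.List.pyRange_neg_one_eq_reverse (children - 2) (-1)
  have e : (-1 : Int) + 1 = 0 := by ring
  have e2 : children - 2 + 1 = children - 1 := by ring
  rw [e, e2] at h
  exact h.symm

-- ===== VERDICT (by name: the statement is the Claim_ definition above) =====
theorem distMoney_spec : Claim_equal_distMoney := by
  intro money children hdom
  have hb : children ≤ 2147483648 := by
    unfold Dom_distMoney pvDomInt at hdom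
    simp only [Bool.and_eq_true, decide_eq_true_eq] at hdom
    exact hdom.2.2
  unfold Spec_distMoney distMoney distMoney_alt
  by_cases h1 : money = children * 8
  · simp [h1]
  · rw [if_neg h1, if_neg h1]
    by_cases h2 : money - (children - 1) * 8 > 0 ∧ money - (children - 1) * 8 ≠ 4
    · rw [if_pos h2, if_pos h2]
    · rw [if_neg h2, if_neg h2]
      rw [reversed_range]
      rw [find_countdown money children (2 ^ 31 + 2) (children - 2) (by push_cast; omega)]
      have hfd : PySem.Int.floordiv (money - children) 7 = (money - children) / 7 :=
        PySem.Int.floordiv_eq_ediv_of_pos (by norm_num)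
      rw [hfd]
      show (match (if 0 ≤ children - 2 ∧ 0 ≤ money - children then
              some (min (children - 2) ((money - children) / 7)) else none : Option Int) with
            | some i => i | none => -1) =
           (if children ≥ 2 ∧ (money - children) / 7 ≥ 0 then
              min (children - 2) ((money - children) / 7) else -1)
      by_cases hA : 0 ≤ children - 2 ∧ 0 ≤ money - children
      · rw [if_pos hA, if_pos (show children ≥ 2 ∧ (money - children) / 7 ≥ 0 from ⟨by omega, by omega⟩)]
      · rw [if_neg hA, if_neg (show ¬(children ≥ 2 ∧ (money - children) / 7 ≥ 0) by omega)]
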